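-- pv_equiv track=rewrite | github.com/kkamggik/algorithms | Programmers/LG전자2022상반기2번.py | solution
-- ===== SOURCE A (Python) =====
-- def solution(s, n):
--     s = list(s)
--     cnt = 0
--     for i in range(len(s)-1):
--         alp = ord(s[i])
--         idx = -1
--         for j in range(i+1,len(s)):
--             if(ord(s[j]) > alp):
--                 alp = ord(s[j])
--                 idx = j
--         if(cnt < n and alp != ord(s[i])):
--             t = s[i]
--             s[i] = s[idx]
--             s[idx] = t
--             cnt += 1
--         else: break
--     answer = "".join(s)
--     return answer
-- ===== SOURCE B (Python) =====
-- def solution(s, n):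
--     # Bucket the positions of each character code once; each greedy step then
--     # looks up the largest code with a position to the right instead of
--     # rescanning the whole suffix.
--     s = list(s)
--     L = len(s)
--     buckets = {}  # code -> ascending list of positions currently holding it
--     for j in range(L):
--         buckets.setdefault(ord(s[j]), []).append(j)
--     cnt = 0
--     for i in range(L - 1):
--         if cnt >= n:
--             break
--         ci = ord(s[i])
--         found = None
--         for c in range(126, ci, -1):
--             b = buckets.get(c)
--             if b:
--                 for p in b:
--                     if p > i:
--                         found = (c, p)
--                         break
--                 if found is not None:
--                     break
--         if found is None:
--             break
--         c, idx = found
--         s[i], s[idx] = s[idx], s[i]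
--         buckets[c] = _insort(_remove(buckets[c], idx), i)
--         buckets[ci] = _insort(_remove(buckets[ci], i), idx)
--         cnt += 1
--     return "".join(s)
--
-- def _remove(lst, x):
--     return [p for p in lst if p != x]
--
-- def _insort(lst, x):
--     out = []
--     k = 0
--     while k < len(lst) and lst[k] < x:
--         out.append(lst[k]); k += 1
--     out.append(x)
--     out.extend(lst[k:])
--     return out
-- ===== Notes on version B (the rewrite author's own statement) =====
-- stated objective: alternative
-- what changed: B replaces A's full rescan of the suffix at every step by per-character-code position buckets (sorted index lists) built once and updated on each swap, so each step probes at most 95 buckets for the highest code with an index to the right instead of scanning the whole remaining string.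
import Mathlib
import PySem

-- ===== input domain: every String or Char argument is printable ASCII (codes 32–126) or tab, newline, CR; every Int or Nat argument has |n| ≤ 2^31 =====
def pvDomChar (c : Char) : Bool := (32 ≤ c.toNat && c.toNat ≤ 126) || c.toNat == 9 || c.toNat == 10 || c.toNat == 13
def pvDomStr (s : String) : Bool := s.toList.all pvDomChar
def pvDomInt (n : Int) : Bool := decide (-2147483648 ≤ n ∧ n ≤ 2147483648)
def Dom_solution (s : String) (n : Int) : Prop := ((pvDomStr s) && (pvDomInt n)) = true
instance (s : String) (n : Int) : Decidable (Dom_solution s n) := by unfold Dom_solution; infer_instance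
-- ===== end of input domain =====

-- B replaces A's per-step rescan of the whole suffix by per-character position
-- buckets built once and updated on each swap (alternative data structure; same exact results).

-- ===== PORT A =====
-- inner scan: for j in range(i+1, len(s)): track (alp, idx), strict-increase updates
def aScan (s : List Char) (alp : Nat) (idx : Int) (j : Nat) : Nat × Int :=
  if _h : j < s.length then
    if (s.getD j ' ').toNat > alp then aScan s (s.getD j ' ').toNat (j : Int) (j + 1)
    else aScan s alp idx (j + 1)
  else (alp, idx)
termination_by s.length - j

-- outer loop over i in range(len(s)-1) with break; swap uses t = s[i]
def aLoop (s : List Char) (n : Int) (cnt : Nat) (i : Nat) : List Char :=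
  if _h : i < s.length - 1 then
    if (cnt : Int) < n ∧ (aScan s (s.getD i ' ').toNat (-1) (i + 1)).1 ≠ (s.getD i ' ').toNat then
      aLoop ((s.set i (s.getD (aScan s (s.getD i ' ').toNat (-1) (i + 1)).2.toNat ' ')).set
        (aScan s (s.getD i ' ').toNat (-1) (i + 1)).2.toNat (s.getD i ' ')) n (cnt + 1) (i + 1)
    else s
  else s
termination_by s.length - 1 - i
decreasing_by simp [List.length_set]; omega

def solution (s : String) (n : Int) : String :=
  String.mk (aLoop s.toList n 0 0)

-- ===== PORT B =====
-- _remove(lst, x) = [p for p in lst if p != x]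
def bRemove (l : List Nat) (x : Nat) : List Nat := l.filter (fun p => p ≠ x)

-- _insort(lst, x): copy the < x prefix, place x, keep the rest
def bInsort : List Nat → Nat → List Nat
  | [], x => [x]
  | h :: t, x => if h < x then h :: bInsort t x else x :: h :: t

-- for p in b: if p > i: return p  (first position greater than i)
def bFirstGT : List Nat → Nat → Option Nat
  | [], _ => none
  | p :: t, i => if p > i then some p else bFirstGT t i

-- for c in range(126, ci, -1): probe bucket c, return (c, first pos > i)
def bQuery (bk : PySem.Dict Nat (List Nat)) (i : Nat) (ci : Nat) (c : Nat) : Option (Nat × Nat) :=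
  if _h : ci < c then
    if (bk.getD c []).isEmpty then bQuery bk i ci (c - 1)
    else
      match bFirstGT (bk.getD c []) i with
      | some p => some (c, p)
      | none => bQuery bk i ci (c - 1)
  else none
termination_by c

-- buckets built once: for j in range(L): buckets.setdefault(ord(s[j]), []).append(j)
def bBuild (s : List Char) : PySem.Dict Nat (List Nat) :=
  (List.range s.length).foldl (fun d j => d.modify (s.getD j ' ').toNat [] (· ++ [j])) PySem.Dict.empty

def bLoop (s : List Char) (bk : PySem.Dict Nat (List Nat)) (n : Int) (cnt : Nat) (i : Nat) :
    List Char :=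
  if _h : i < s.length - 1 then
    if (cnt : Int) ≥ n then s
    else
      match bQuery bk i ((s.getD i ' ').toNat) 126 with
      | none => s
      | some (c, idx) =>
        bLoop ((s.set i (s.getD idx ' ')).set idx (s.getD i ' '))
          ((bk.insert c (bInsort (bRemove (bk.getD c []) idx) i)).insert ((s.getD i ' ').toNat)
            (bInsort (bRemove (bk.getD ((s.getD i ' ').toNat) []) i) idx)) n (cnt + 1) (i + 1)
  else s
termination_by s.length - 1 - i
decreasing_by simp [List.length_set]; omega

def solution_alt (s : String) (n : Int) : String :=
  String.mk (bLoop s.toList (bBuild s.toList) n 0 0)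

-- ===== PRECONDITION & SPEC =====
def Spec_solution (s : String) (n : Int) (out : String) : Prop := out = solution_alt s n
instance (s : String) (n : Int) (out : String) : Decidable (Spec_solution s n out) := by
  unfold Spec_solution; infer_instance

-- ===== CLAIM (what is proved, stated in full; the proofs are below) =====
def Claim_equal_solution : Prop := ∀ (s : String) (n : Int), Dom_solution s n → Spec_solution s n (solution s n)

-- ===== LEMMAS AND PROOFS =====

-- the character code at position k (as A and B read it)
def cAt (s : List Char) (k : Nat) : Nat := (s.getD k ' ').toNat

lemma cAt_def (s : List Char) (k : Nat) : (s.getD k ' ').toNat = cAt s k := rfl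

-- reference: best (max code, first argmax) among positions ≥ j with code > threshold ci
def best (s : List Char) (ci : Nat) (j : Nat) : Option (Nat × Nat) :=
  if _h : j < s.length then
    match best s ci (j + 1) with
    | none => if cAt s j > ci then some (cAt s j, j) else none
    | some (m, k) => if cAt s j ≥ m then some (cAt s j, j) else some (m, k)
  else none
termination_by s.length - j

-- bucket invariant: bk.getD c [] is the strictly sorted list of positions of code c
def BInv (s : List Char) (bk : PySem.Dict Nat (List Nat)) : Prop :=
  ∀ c : Nat, (bk.getD c []).Pairwise (· < ·) ∧
    ∀ p : Nat, p ∈ bk.getD c [] ↔ p < s.length ∧ cAt s p = c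

-- equation lemmas
lemma best_neg {s : List Char} {ci j : Nat} (hj : ¬ j < s.length) : best s ci j = none := by
  rw [best, dif_neg hj]

lemma best_pos_none {s : List Char} {ci j : Nat} (hj : j < s.length)
    (hrest : best s ci (j + 1) = none) :
    best s ci j = if cAt s j > ci then some (cAt s j, j) else none := by
  rw [best, dif_pos hj, hrest]

lemma best_pos_some {s : List Char} {ci j m k : Nat} (hj : j < s.length)
    (hrest : best s ci (j + 1) = some (m, k)) :
    best s ci j = if cAt s j ≥ m then some (cAt s j, j) else some (m, k) := by
  rw [best, dif_pos hj, hrest]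

lemma aScan_neg {s : List Char} {alp j : Nat} {idx : Int} (hj : ¬ j < s.length) :
    aScan s alp idx j = (alp, idx) := by
  rw [aScan, dif_neg hj]

lemma aScan_pos_gt {s : List Char} {alp j : Nat} {idx : Int} (hj : j < s.length)
    (hgt : cAt s j > alp) : aScan s alp idx j = aScan s (cAt s j) (j : Int) (j + 1) := by
  rw [aScan, dif_pos hj, cAt_def, if_pos hgt]

lemma aScan_pos_le {s : List Char} {alp j : Nat} {idx : Int} (hj : j < s.length)
    (hle : ¬ cAt s j > alp) : aScan s alp idx j = aScan s alp idx (j + 1) := by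
  rw [aScan, dif_pos hj, cAt_def, if_neg hle]

lemma bQuery_neg {bk : PySem.Dict Nat (List Nat)} {i ci c : Nat} (h : ¬ ci < c) :
    bQuery bk i ci c = none := by
  rw [bQuery, dif_neg h]

lemma bQuery_empty {bk : PySem.Dict Nat (List Nat)} {i ci c : Nat} (h : ci < c)
    (he : (bk.getD c []).isEmpty) : bQuery bk i ci c = bQuery bk i ci (c - 1) := by
  rw [bQuery, dif_pos h, if_pos he]

lemma bQuery_found {bk : PySem.Dict Nat (List Nat)} {i ci c p : Nat} (h : ci < c)
    (he : ¬ (bk.getD c []).isEmpty) (hfg : bFirstGT (bk.getD c []) i = some p) :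
    bQuery bk i ci c = some (c, p) := by
  rw [bQuery, dif_pos h, if_neg he, hfg]

lemma bQuery_miss {bk : PySem.Dict Nat (List Nat)} {i ci c : Nat} (h : ci < c)
    (he : ¬ (bk.getD c []).isEmpty) (hfg : bFirstGT (bk.getD c []) i = none) :
    bQuery bk i ci c = bQuery bk i ci (c - 1) := by
  rw [bQuery, dif_pos h, if_neg he, hfg]

lemma aLoop_stop {s : List Char} {n : Int} {cnt i : Nat} (h : ¬ i < s.length - 1) :
    aLoop s n cnt i = s := by
  rw [aLoop, dif_neg h]

lemma aLoop_done {s : List Char} {n : Int} {cnt i : Nat} (h : i < s.length - 1)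
    (hc : ¬ ((cnt : Int) < n ∧ (aScan s (s.getD i ' ').toNat (-1) (i + 1)).1 ≠ (s.getD i ' ').toNat)) :
    aLoop s n cnt i = s := by
  rw [aLoop, dif_pos h, if_neg hc]

lemma aLoop_swap {s : List Char} {n : Int} {cnt i : Nat} (h : i < s.length - 1)
    (hc : (cnt : Int) < n ∧ (aScan s (s.getD i ' ').toNat (-1) (i + 1)).1 ≠ (s.getD i ' ').toNat) :
    aLoop s n cnt i =
      aLoop ((s.set i (s.getD (aScan s (s.getD i ' ').toNat (-1) (i + 1)).2.toNat ' ')).set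
        (aScan s (s.getD i ' ').toNat (-1) (i + 1)).2.toNat (s.getD i ' ')) n (cnt + 1) (i + 1) := by
  rw [aLoop, dif_pos h, if_pos hc]

lemma bLoop_stop {s : List Char} {bk : PySem.Dict Nat (List Nat)} {n : Int} {cnt i : Nat}
    (h : ¬ i < s.length - 1) : bLoop s bk n cnt i = s := by
  rw [bLoop, dif_neg h]

lemma bLoop_budget {s : List Char} {bk : PySem.Dict Nat (List Nat)} {n : Int} {cnt i : Nat}
    (h : i < s.length - 1) (hc : (cnt : Int) ≥ n) : bLoop s bk n cnt i = s := by
  rw [bLoop, dif_pos h, if_pos hc]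

lemma bLoop_none {s : List Char} {bk : PySem.Dict Nat (List Nat)} {n : Int} {cnt i : Nat}
    (h : i < s.length - 1) (hc : ¬ (cnt : Int) ≥ n)
    (hq : bQuery bk i ((s.getD i ' ').toNat) 126 = none) : bLoop s bk n cnt i = s := by
  rw [bLoop, dif_pos h, if_neg hc, hq]

lemma bLoop_some {s : List Char} {bk : PySem.Dict Nat (List Nat)} {n : Int} {cnt i c p : Nat}
    (h : i < s.length - 1) (hc : ¬ (cnt : Int) ≥ n)
    (hq : bQuery bk i ((s.getD i ' ').toNat) 126 = some (c, p)) :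
    bLoop s bk n cnt i =
      bLoop ((s.set i (s.getD p ' ')).set p (s.getD i ' '))
        ((bk.insert c (bInsort (bRemove (bk.getD c []) p) i)).insert ((s.getD i ' ').toNat)
          (bInsort (bRemove (bk.getD ((s.getD i ' ').toNat) []) i) p)) n (cnt + 1) (i + 1) := by
  rw [bLoop, dif_pos h, if_neg hc, hq]

lemma best_sound (s : List Char) (ci : Nat) : ∀ j m k, best s ci j = some (m, k) →
    ci < m ∧ j ≤ k ∧ k < s.length ∧ cAt s k = m := by
  suffices H : ∀ N j m k, s.length - j ≤ N → best s ci j = some (m, k) →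
      ci < m ∧ j ≤ k ∧ k < s.length ∧ cAt s k = m by
    intro j m k; exact H _ j m k le_rfl
  intro N
  induction N with
  | zero =>
    intro j m k hle h
    rw [best_neg (by omega)] at h
    exact absurd h (by simp)
  | succ N ih =>
    intro j m k hle h
    by_cases hj : j < s.length
    · rcases hrest : best s ci (j + 1) with _ | ⟨m', k'⟩
      · rw [best_pos_none hj hrest] at h
        split_ifs at h with hgt
        · simp only [Option.some.injEq, Prod.mk.injEq] at h
          obtain ⟨h1, h2⟩ := h
          subst h2
          exact ⟨by omega, le_rfl, hj, h1⟩
      · obtain ⟨hm', hk1, hk2, hk3⟩ := ih (j + 1) m' k' (by omega) hrest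
        rw [best_pos_some hj hrest] at h
        split_ifs at h with hge
        · simp only [Option.some.injEq, Prod.mk.injEq] at h
          obtain ⟨h1, h2⟩ := h
          subst h2
          exact ⟨by omega, le_rfl, hj, h1⟩
        · simp only [Option.some.injEq, Prod.mk.injEq] at h
          obtain ⟨h1, h2⟩ := h
          subst h1; subst h2
          exact ⟨hm', by omega, hk2, hk3⟩
    · rw [best_neg hj] at h
      exact absurd h (by simp)

lemma best_thresh (s : List Char) : ∀ j a b, a ≤ b →
    best s b j = (best s a j).bind (fun mk => if b < mk.1 then some mk else none) := by
  suffices H : ∀ N j a b, s.length - j ≤ N → a ≤ b →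
      best s b j = (best s a j).bind (fun mk => if b < mk.1 then some mk else none) by
    intro j a b hab; exact H _ j a b le_rfl hab
  intro N
  induction N with
  | zero =>
    intro j a b hle hab
    rw [best_neg (show ¬ j < s.length by omega), best_neg (show ¬ j < s.length by omega)]
    rfl
  | succ N ih =>
    intro j a b hle hab
    by_cases hj : j < s.length
    · rcases hrest : best s a (j + 1) with _ | ⟨m, k⟩
      · have hrb : best s b (j + 1) = none := by
          rw [ih (j + 1) a b (by omega) hab, hrest]; rfl
        rw [best_pos_none hj hrb, best_pos_none hj hrest]
        split_ifs with h1 h2 h2 <;> (try simp) <;> (try omega)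
      · obtain ⟨hm, _, _, _⟩ := best_sound s a (j + 1) m k hrest
        by_cases hbm : b < m
        · have hrb : best s b (j + 1) = some (m, k) := by
            rw [ih (j + 1) a b (by omega) hab, hrest]
            simp [hbm]
          rw [best_pos_some hj hrb, best_pos_some hj hrest]
          split_ifs with h1 <;> (try simp) <;> (try omega)
        · have hrb : best s b (j + 1) = none := by
            rw [ih (j + 1) a b (by omega) hab, hrest]
            simp [hbm]
          rw [best_pos_none hj hrb, best_pos_some hj hrest]
          split_ifs with h1 h2 h2 <;> (try simp) <;> (try omega)
    · rw [best_neg hj, best_neg hj]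
      rfl

lemma aScan_eq_best (s : List Char) : ∀ j alp idx, aScan s alp idx j =
    ((best s alp j).map (fun mk => (mk.1, (mk.2 : Int)))).getD (alp, idx) := by
  suffices H : ∀ N j alp idx, s.length - j ≤ N → aScan s alp idx j =
      ((best s alp j).map (fun mk => (mk.1, (mk.2 : Int)))).getD (alp, idx) by
    intro j alp idx; exact H _ j alp idx le_rfl
  intro N
  induction N with
  | zero =>
    intro j alp idx hle
    rw [aScan_neg (by omega), best_neg (by omega)]
    rfl
  | succ N ih =>
    intro j alp idx hle
    by_cases hj : j < s.length
    · by_cases hgt : cAt s j > alp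
      · rw [aScan_pos_gt hj hgt, ih (j + 1) _ _ (by omega),
          best_thresh s (j + 1) alp (cAt s j) (by omega)]
        rcases hrest : best s alp (j + 1) with _ | ⟨m, k⟩
        · rw [best_pos_none hj hrest, if_pos hgt]
          rfl
        · obtain ⟨hm, _, _, _⟩ := best_sound s alp (j + 1) m k hrest
          by_cases hmc : cAt s j < m
          · rw [best_pos_some hj hrest, if_neg (by omega)]
            try simp [hmc]
          · rw [best_pos_some hj hrest, if_pos (by omega)]
            try simp [hmc]
      · rw [aScan_pos_le hj hgt, ih (j + 1) _ _ (by omega)]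
        rcases hrest : best s alp (j + 1) with _ | ⟨m, k⟩
        · rw [best_pos_none hj hrest, if_neg hgt]
        · obtain ⟨hm, _, _, _⟩ := best_sound s alp (j + 1) m k hrest
          rw [best_pos_some hj hrest, if_neg (by omega)]
    · rw [aScan_neg hj, best_neg hj]
      rfl

lemma best_none_of (s : List Char) (ci : Nat) : ∀ j,
    (∀ k, j ≤ k → k < s.length → cAt s k ≤ ci) → best s ci j = none := by
  suffices H : ∀ N j, s.length - j ≤ N → (∀ k, j ≤ k → k < s.length → cAt s k ≤ ci) →
      best s ci j = none by
    intro j hall; exact H _ j le_rfl hall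
  intro N
  induction N with
  | zero => intro j hle hall; exact best_neg (by omega)
  | succ N ih =>
    intro j hle hall
    by_cases hj : j < s.length
    · rw [best_pos_none hj (ih (j + 1) (by omega) (fun k hk1 hk2 => hall k (by omega) hk2))]
      rw [if_neg (by have := hall j le_rfl hj; omega)]
    · exact best_neg hj

lemma best_of_spec (s : List Char) (ci : Nat) : ∀ j m k, ci < m → j ≤ k → k < s.length →
    cAt s k = m → (∀ l, j ≤ l → l < s.length → cAt s l ≤ m) →
    (∀ l, j ≤ l → l < k → cAt s l < m) →
    best s ci j = some (m, k) := by
  suffices H : ∀ N j m k, s.length - j ≤ N → ci < m → j ≤ k → k < s.length →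
      cAt s k = m → (∀ l, j ≤ l → l < s.length → cAt s l ≤ m) →
      (∀ l, j ≤ l → l < k → cAt s l < m) → best s ci j = some (m, k) by
    intro j m k; exact H _ j m k le_rfl
  intro N
  induction N with
  | zero => intro j m k hle _ hjk hk _ _ _; omega
  | succ N ih =>
    intro j m k hle hcm hjk hk hck hall hfirst
    have hj : j < s.length := by omega
    rcases Nat.eq_or_lt_of_le hjk with heq | hlt
    · subst heq
      rcases hrest : best s ci (j + 1) with _ | ⟨m', k'⟩
      · rw [best_pos_none hj hrest, if_pos (by omega), hck]
      · obtain ⟨_, hk'1, hk'2, hk'3⟩ := best_sound s ci (j + 1) m' k' hrest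
        have : m' ≤ m := hk'3 ▸ hall k' (by omega) hk'2
        rw [best_pos_some hj hrest, if_pos (by omega), hck]
    · rw [best_pos_some hj (ih (j + 1) m k (by omega) hcm (by omega) hk hck
        (fun l h1 h2 => hall l (by omega) h2) (fun l h1 h2 => hfirst l (by omega) h2))]
      rw [if_neg (by have := hfirst j le_rfl hlt; omega)]

lemma bFirstGT_spec (i : Nat) : ∀ l : List Nat, l.Pairwise (· < ·) →
    (∀ p, bFirstGT l i = some p → p ∈ l ∧ i < p ∧ ∀ q ∈ l, i < q → p ≤ q) ∧
    (bFirstGT l i = none → ∀ p ∈ l, p ≤ i) := by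
  intro l
  induction l with
  | nil =>
    intro _
    constructor
    · intro p h; exact absurd h (by simp [bFirstGT])
    · intro _ p h; exact absurd h (by simp)
  | cons h t ih =>
    intro hpw
    rw [List.pairwise_cons] at hpw
    obtain ⟨hhead, htail⟩ := hpw
    obtain ⟨ihs, ihn⟩ := ih htail
    constructor
    · intro p hp
      rw [bFirstGT] at hp
      split_ifs at hp with hgt
      · cases hp
        refine ⟨List.mem_cons_self, hgt, ?_⟩
        intro q hq _
        rcases List.mem_cons.mp hq with rfl | hq
        · exact le_rfl
        · exact le_of_lt (hhead q hq)
      · obtain ⟨h1, h2, h3⟩ := ihs p hp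
        refine ⟨List.mem_cons_of_mem _ h1, h2, ?_⟩
        intro q hq hiq
        rcases List.mem_cons.mp hq with rfl | hq
        · omega
        · exact h3 q hq hiq
    · intro hn p hp
      rw [bFirstGT] at hn
      split_ifs at hn with hgt
      rcases List.mem_cons.mp hp with rfl | hp
      · omega
      · exact ihn hn p hp

lemma bQuery_eq_best (s : List Char) (bk : PySem.Dict Nat (List Nat)) (hInv : BInv s bk)
    (i : Nat) (ci : Nat) : ∀ c, (∀ k, i < k → k < s.length → cAt s k ≤ c) →
    bQuery bk i ci c = best s ci (i + 1) := by
  intro c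
  induction c using Nat.strong_induction_on with
  | _ c ih =>
    intro hall
    by_cases hcic : ci < c
    · obtain ⟨hpw, hmem⟩ := hInv c
      have hnone_of : (∀ p ∈ bk.getD c [], p ≤ i) →
          bQuery bk i ci (c - 1) = best s ci (i + 1) := by
        intro hle
        refine ih (c - 1) (by omega) ?_
        intro k hk1 hk2
        have := hall k hk1 hk2
        rcases Nat.lt_or_ge (cAt s k) c with h | h
        · omega
        · have hkc : cAt s k = c := by omega
          have hkb : k ∈ bk.getD c [] := (hmem k).mpr ⟨hk2, hkc⟩
          have := hle k hkb
          omega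
      by_cases hemp : (bk.getD c []).isEmpty
      · rw [bQuery_empty hcic hemp]
        refine hnone_of ?_
        intro p hp
        rw [List.isEmpty_iff] at hemp
        rw [hemp] at hp
        exact absurd hp (by simp)
      · obtain ⟨hsome, hnone⟩ := bFirstGT_spec i (bk.getD c []) hpw
        rcases hfg : bFirstGT (bk.getD c []) i with _ | p
        · rw [bQuery_miss hcic hemp hfg]
          exact hnone_of (hnone hfg)
        · rw [bQuery_found hcic hemp hfg]
          obtain ⟨hpmem, hip, hmin⟩ := hsome p hfg
          obtain ⟨hplen, hpc⟩ := (hmem p).mp hpmem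
          refine (best_of_spec s ci (i + 1) c p hcic hip hplen hpc
            (fun l h1 h2 => hall l (by omega) h2) ?_).symm
          intro l h1 h2
          have hlec := hall l (by omega) (by omega)
          rcases Nat.lt_or_ge (cAt s l) c with h | h
          · exact h
          · have hlc : cAt s l = c := by omega
            have hlb : l ∈ bk.getD c [] := (hmem l).mpr ⟨by omega, hlc⟩
            have := hmin l hlb (by omega)
            omega
    · rw [bQuery_neg hcic]
      exact (best_none_of s ci (i + 1) (fun k hk1 hk2 => by
        have := hall k (by omega) hk2; omega)).symm

lemma bBuild_getD (s : List Char) : ∀ (l : List Nat) (d : PySem.Dict Nat (List Nat)) (c : Nat),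
    (l.foldl (fun d j => d.modify (s.getD j ' ').toNat [] (· ++ [j])) d).getD c [] =
      d.getD c [] ++ l.filter (fun j => cAt s j == c) := by
  intro l
  induction l with
  | nil => intro d c; simp
  | cons h t ih =>
    intro d c
    rw [List.foldl_cons, ih, List.filter_cons, PySem.Dict.getD_modify, cAt_def]
    by_cases hc : cAt s h = c
    · rw [if_pos hc.symm]
      simp [hc, List.append_assoc]
    · rw [if_neg (fun hh => hc hh.symm)]
      simp [hc]

lemma inv_build (s : List Char) : BInv s (bBuild s) := by
  intro c
  unfold bBuild
  rw [bBuild_getD s (List.range s.length) PySem.Dict.empty c, PySem.Dict.getD_empty,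
    List.nil_append]
  constructor
  · exact List.pairwise_lt_range.filter _
  · intro p
    simp [List.mem_filter, List.mem_range, and_comm]

lemma mem_bRemove (l : List Nat) (x q : Nat) : q ∈ bRemove l x ↔ q ∈ l ∧ q ≠ x := by
  simp [bRemove]

lemma mem_bInsort : ∀ (l : List Nat) (x q : Nat), q ∈ bInsort l x ↔ q = x ∨ q ∈ l := by
  intro l
  induction l with
  | nil => intro x q; simp [bInsort]
  | cons h t ih =>
    intro x q
    rw [bInsort]
    split_ifs with hlt
    · simp [ih]
      tauto
    · simp

lemma pairwise_bInsort : ∀ (l : List Nat) (x : Nat), x ∉ l → l.Pairwise (· < ·) →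
    (bInsort l x).Pairwise (· < ·) := by
  intro l
  induction l with
  | nil => intro x _ _; simp [bInsort]
  | cons h t ih =>
    intro x hx hpw
    rw [List.pairwise_cons] at hpw
    obtain ⟨hhead, htail⟩ := hpw
    rw [bInsort]
    split_ifs with hlt
    · rw [List.pairwise_cons]
      refine ⟨?_, ih x (fun hh => hx (List.mem_cons_of_mem _ hh)) htail⟩
      intro q hq
      rcases (mem_bInsort t x q).mp hq with rfl | hq
      · exact hlt
      · exact hhead q hq
    · have hxh : x ≠ h := fun hh => hx (hh ▸ List.mem_cons_self)
      rw [List.pairwise_cons]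
      refine ⟨?_, List.pairwise_cons.mpr ⟨hhead, htail⟩⟩
      intro q hq
      rcases List.mem_cons.mp hq with rfl | hq
      · omega
      · have := hhead q hq
        omega

lemma cAt_swap (s : List Char) (i p : Nat) (hi : i < s.length) (hp : p < s.length) (k : Nat) :
    cAt ((s.set i (s.getD p ' ')).set p (s.getD i ' ')) k =
      if k = p then cAt s i else if k = i then cAt s p else cAt s k := by
  unfold cAt
  rw [List.getD_eq_getElem?_getD, List.getElem?_set]
  simp only [List.length_set]
  by_cases hkp : p = k
  · subst hkp
    rw [if_pos rfl, if_pos hp, if_pos rfl]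
    rfl
  · rw [if_neg hkp, List.getElem?_set, if_neg (Ne.symm hkp)]
    by_cases hki : i = k
    · subst hki
      rw [if_pos rfl, if_pos hi, if_pos rfl]
      rfl
    · rw [if_neg hki, if_neg (Ne.symm hki), List.getD_eq_getElem?_getD]

lemma inv_preserved (s : List Char) (bk : PySem.Dict Nat (List Nat)) (hInv : BInv s bk)
    (i p : Nat) (hi : i < s.length) (hp : p < s.length) (hne : cAt s i ≠ cAt s p) :
    BInv ((s.set i (s.getD p ' ')).set p (s.getD i ' '))
      ((bk.insert (cAt s p) (bInsort (bRemove (bk.getD (cAt s p) []) p) i)).insert (cAt s i)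
        (bInsort (bRemove (bk.getD (cAt s i) []) i) p)) := by
  intro d
  have hip : i ≠ p := fun hh => hne (hh ▸ rfl)
  have hlen : ((s.set i (s.getD p ' ')).set p (s.getD i ' ')).length = s.length := by
    simp [List.length_set]
  rw [PySem.Dict.getD_insert, PySem.Dict.getD_insert]
  by_cases hd1 : d = cAt s i
  · rw [if_pos hd1]
    obtain ⟨hpw, hmem⟩ := hInv (cAt s i)
    have hpnotin : p ∉ bRemove (bk.getD (cAt s i) []) i := by
      rw [mem_bRemove]
      rintro ⟨hh, -⟩
      exact hne ((hmem p).mp hh).2.symm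
    constructor
    · exact pairwise_bInsort _ p hpnotin (hpw.filter _)
    · intro q
      rw [mem_bInsort, mem_bRemove, hmem q, hlen, cAt_swap s i p hi hp q, hd1]
      by_cases hqp : q = p
      · subst hqp
        simp [hp]
      · by_cases hqi : q = i
        · subst hqi
          simp only [if_neg hqp]
          constructor
          · rintro (rfl | ⟨⟨-, hc⟩, hqi2⟩)
            · exact absurd rfl hqp
            · exact absurd rfl hqi2
          · rintro ⟨-, hc⟩
            exact absurd hc.symm hne
        · simp only [if_neg hqp, if_neg hqi]
          constructor
          · rintro (rfl | ⟨⟨h1, h2⟩, -⟩)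
            · exact absurd rfl hqp
            · exact ⟨h1, h2⟩
          · rintro ⟨h1, h2⟩
            exact Or.inr ⟨⟨h1, h2⟩, hqi⟩
  · rw [if_neg hd1]
    by_cases hd2 : d = cAt s p
    · rw [if_pos hd2]
      obtain ⟨hpw, hmem⟩ := hInv (cAt s p)
      have hinotin : i ∉ bRemove (bk.getD (cAt s p) []) p := by
        rw [mem_bRemove]
        rintro ⟨hh, -⟩
        exact hne ((hmem i).mp hh).2
      constructor
      · exact pairwise_bInsort _ i hinotin (hpw.filter _)
      · intro q
        rw [mem_bInsort, mem_bRemove, hmem q, hlen, cAt_swap s i p hi hp q, hd2]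
        by_cases hqp : q = p
        · subst hqp
          rw [if_pos rfl]
          constructor
          · rintro (rfl | ⟨⟨-, hc⟩, hqp2⟩)
            · exact absurd rfl hip
            · exact absurd rfl hqp2
          · rintro ⟨-, hc⟩
            exact absurd hc hne
        · by_cases hqi : q = i
          · subst hqi
            simp [hqp, hi]
          · simp only [if_neg hqp, if_neg hqi]
            constructor
            · rintro (rfl | ⟨⟨h1, h2⟩, -⟩)
              · exact absurd rfl hqi
              · exact ⟨h1, h2⟩
            · rintro ⟨h1, h2⟩
              exact Or.inr ⟨⟨h1, h2⟩, hqp⟩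
    · rw [if_neg hd2]
      obtain ⟨hpw, hmem⟩ := hInv d
      refine ⟨hpw, ?_⟩
      intro q
      rw [hmem q, hlen, cAt_swap s i p hi hp q]
      by_cases hqp : q = p
      · subst hqp
        rw [if_pos rfl]
        constructor
        · rintro ⟨h1, h2⟩
          exact absurd h2.symm (by assumption)
        · rintro ⟨h1, h2⟩
          exact absurd h2.symm (by assumption)
      · by_cases hqi : q = i
        · subst hqi
          rw [if_neg hqp, if_pos rfl]
          constructor
          · rintro ⟨h1, h2⟩
            exact absurd h2.symm (by assumption)
          · rintro ⟨h1, h2⟩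
            exact absurd h2.symm (by assumption)
        · rw [if_neg hqp, if_neg hqi]

lemma loops_eq (s : List Char) (bk : PySem.Dict Nat (List Nat)) (n : Int) (cnt : Nat) (i : Nat)
    (hcode : ∀ ch ∈ s, ch.toNat ≤ 126) (hInv : BInv s bk) :
    aLoop s n cnt i = bLoop s bk n cnt i := by
  suffices H : ∀ N s bk cnt i, s.length - i ≤ N → (∀ ch ∈ s, ch.toNat ≤ 126) → BInv s bk →
      aLoop s n cnt i = bLoop s bk n cnt i by
    exact H _ s bk cnt i le_rfl hcode hInv
  clear hcode hInv bk s cnt i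
  intro N
  induction N with
  | zero =>
    intro s bk cnt i hle _ _
    rw [aLoop_stop (by omega), bLoop_stop (by omega)]
  | succ N ih =>
    intro s bk cnt i hle hcode hInv
    by_cases hi : i < s.length - 1
    · by_cases hcnt : (cnt : Int) ≥ n
      · rw [bLoop_budget hi hcnt, aLoop_done hi (by push_neg; intro h; omega)]
      · have hq : bQuery bk i ((s.getD i ' ').toNat) 126 = best s (cAt s i) (i + 1) := by
          refine bQuery_eq_best s bk hInv i (cAt s i) 126 ?_
          intro k _ hk
          have hmem : s.getD k ' ' ∈ s := by
            rw [List.getD_eq_getElem s ' ' hk]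
            exact List.getElem_mem hk
          exact hcode _ hmem
        have ha := aScan_eq_best s (i + 1) ((s.getD i ' ').toNat) (-1)
        rw [cAt_def] at ha
        rcases hbest : best s (cAt s i) (i + 1) with _ | ⟨m, k⟩
        · rw [hbest] at ha
          rw [bLoop_none hi hcnt (hq.trans hbest),
            aLoop_done hi (by rw [cAt_def, ha]; push_neg; intro _; rfl)]
        · rw [hbest] at ha
          obtain ⟨hm, hk1, hk2, hk3⟩ := best_sound s (cAt s i) (i + 1) m k hbest
          have hcond : (cnt : Int) < n ∧
              (aScan s (s.getD i ' ').toNat (-1) (i + 1)).1 ≠ (s.getD i ' ').toNat := by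
            rw [cAt_def, ha]
            exact ⟨by omega, by simp; omega⟩
          rw [aLoop_swap hi hcond, bLoop_some hi hcnt (hq.trans hbest), cAt_def, ha]
          simp only [Option.map_some, Option.getD_some, Int.toNat_natCast]
          have hilen : i < s.length := by omega
          have hmne : cAt s i ≠ cAt s k := by rw [hk3]; omega
          have hInv' := inv_preserved s bk hInv i k hilen hk2 hmne
          rw [hk3] at hInv'
          refine ih _ _ (cnt + 1) (i + 1) (by simp [List.length_set]; omega) ?_ hInv'
          intro ch hch
          rcases List.mem_or_eq_of_mem_set hch with hch | rfl
          · rcases List.mem_or_eq_of_mem_set hch with hch | rfl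
            · exact hcode ch hch
            · refine hcode _ ?_
              rw [List.getD_eq_getElem s ' ' hk2]
              exact List.getElem_mem hk2
          · refine hcode _ ?_
            rw [List.getD_eq_getElem s ' ' hilen]
            exact List.getElem_mem hilen
    · rw [aLoop_stop hi, bLoop_stop hi]

-- ===== VERDICT (by name: the statement is the Claim_ definition above) =====
theorem solution_spec : Claim_equal_solution := by
  intro s n hdom
  unfold Spec_solution solution solution_alt
  refine congrArg String.mk (loops_eq _ _ n 0 0 ?_ (inv_build _))
  intro ch hch
  have hc : pvDomChar ch = true := by
    have hd := hdom
    simp [Dom_solution, pvDomStr, List.all_eq_true] at hd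
    exact hd.1 ch hch
  simp [pvDomChar] at hc
  omega
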